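-- pv_equiv track=rewrite | github.com/edacrema/VAM-UNIFIED-APP | app/streamlit_backend/dispatcher.py | _get_food_basket_commodities
-- ===== SOURCE A (Python) =====
-- from typing import Any, Dict, List, Optional, Tuple
--
-- def _get_food_basket_commodities(available: List[str]) -> List[str]:
--     defaults: List[str] = []
--     priority_patterns = [
--         ("sorghum", "Cereals"),
--         ("maize", "Cereals"),
--         ("wheat", "Cereals"),
--         ("rice", "Cereals"),
--         ("beans", "Pulses"),
--         ("lentil", "Pulses"),
--         ("oil", "Oil"),
--         ("salt", "Condiments"),
--         ("sugar", "Sugar"),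
--     ]
--
--     selected_categories = set()
--
--     for pattern, category in priority_patterns:
--         if category in selected_categories and category != "Cereals":
--             continue
--         for commodity in available:
--             if pattern in commodity.lower() and commodity not in defaults:
--                 defaults.append(commodity)
--                 selected_categories.add(category)
--                 break
--
--     return defaults[:6]
-- ===== SOURCE B (Python) =====
-- from typing import List
--
-- def _get_food_basket_commodities(available: List[str]) -> List[str]:
--     patterns = ["sorghum", "maize", "wheat", "rice", "beans", "lentil",
--                 "oil", "salt", "sugar"]
--     groups = [("Cereals", ["sorghum", "maize", "wheat", "rice"]),
--               ("Pulses", ["beans", "lentil"]),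
--               ("Oil", ["oil"]),
--               ("Condiments", ["salt"]),
--               ("Sugar", ["sugar"])]
--     # Stage 1: ONE pass over `available` builds an index pattern -> matching
--     # commodities in order; stage 2 never rescans `available`.
--     matches = {p: [] for p in patterns}
--     for c in available:
--         lc = c.lower()
--         for p in patterns:
--             if p in lc:
--                 matches[p].append(c)
--     # Stage 2: selection from the precomputed index.
--     chosen: List[str] = []
--     for category, pats in groups:
--         for p in pats:
--             pick = next((x for x in matches[p] if x not in chosen), None)
--             if pick is not None:
--                 chosen.append(pick)
--                 if category != "Cereals":
--                     break
--     return chosen[:6]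
-- ===== Notes on version B (the rewrite author's own statement) =====
-- stated objective: alternative
-- what changed: B is a two-stage algorithm: one pass over `available` builds a dict index pattern -> ordered matching commodities, and a selection stage walks category groups reading only the precomputed index (no rescan of `available`), whereas A repeatedly scans `available` inside a flat pattern loop guarded by a selected-categories set.
import Mathlib
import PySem

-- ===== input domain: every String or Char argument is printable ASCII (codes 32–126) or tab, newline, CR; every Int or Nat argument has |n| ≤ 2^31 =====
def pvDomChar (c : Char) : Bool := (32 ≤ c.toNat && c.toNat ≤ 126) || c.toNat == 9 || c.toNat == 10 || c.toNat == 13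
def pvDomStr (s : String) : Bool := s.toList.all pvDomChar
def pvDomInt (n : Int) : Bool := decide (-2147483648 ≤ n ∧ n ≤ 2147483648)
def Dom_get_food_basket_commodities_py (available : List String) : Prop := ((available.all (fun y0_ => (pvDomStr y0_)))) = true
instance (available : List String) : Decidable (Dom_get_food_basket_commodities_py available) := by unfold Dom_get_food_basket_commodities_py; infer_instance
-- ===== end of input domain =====

-- B is a two-stage algorithm (one pass over `available` builds a pattern->matches index, then a
-- selection stage reads only the index) instead of A's pattern loop rescanning `available`;
-- same result and cost (objective: alternative).

-- ===== PORT A =====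
def pvPatternsA : List (String × String) :=
  [("sorghum", "Cereals"), ("maize", "Cereals"), ("wheat", "Cereals"), ("rice", "Cereals"),
   ("beans", "Pulses"), ("lentil", "Pulses"), ("oil", "Oil"), ("salt", "Condiments"),
   ("sugar", "Sugar")]

-- the inner 'for commodity in available: …; break'
def pvInnerA (pattern category : String) (st : List String × PySem.Set String) :
    List String → List String × PySem.Set String
  | [] => st
  | c :: rest =>
    if PySem.Str.isIn pattern (PySem.Str.lower c) && !(st.1.contains c) then
      (st.1 ++ [c], PySem.Set.add st.2 category)
    else pvInnerA pattern category st rest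

def pvStepA (available : List String) (st : List String × PySem.Set String)
    (pc : String × String) : List String × PySem.Set String :=
  if PySem.Set.contains st.2 pc.2 && !(pc.2 == "Cereals") then st
  else pvInnerA pc.1 pc.2 st available

def get_food_basket_commodities_py (available : List String) : List String :=
  PySem.List.slice
    ((pvPatternsA.foldl (pvStepA available) ([], PySem.Set.empty))).1 none (some 6)

-- ===== PORT B =====
def pvPatsB : List String :=
  ["sorghum", "maize", "wheat", "rice", "beans", "lentil", "oil", "salt", "sugar"]

def pvGroupsB : List (String × List String) :=
  [("Cereals", ["sorghum", "maize", "wheat", "rice"]),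
   ("Pulses", ["beans", "lentil"]),
   ("Oil", ["oil"]),
   ("Condiments", ["salt"]),
   ("Sugar", ["sugar"])]

-- Stage 1: 'matches = {p: [] for p in patterns}; for c in available: for p in patterns: …append(c)'
-- (the Python iterates the dict's keys, which are exactly `patterns` in order)
def pvIndexB (available : List String) : PySem.Dict String (List String) :=
  available.foldl
    (fun d c =>
      pvPatsB.foldl
        (fun d p =>
          if PySem.Str.isIn p (PySem.Str.lower c) then d.modify p [] (· ++ [c]) else d) d)
    (pvPatsB.foldl (fun d p => d.insert p []) PySem.Dict.empty)

-- next((x for x in matches[p] if x not in chosen), None)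
def pvPickB (chosen : List String) : List String → Option String
  | [] => none
  | x :: rest => if !(chosen.contains x) then some x else pvPickB chosen rest

-- Stage 2: the 'for p in pats' loop of one (category, pats) group
def pvSelB (m : PySem.Dict String (List String)) (category : String) (chosen : List String) :
    List String → List String
  | [] => chosen
  | p :: rest =>
    match pvPickB chosen (m.getD p []) with
    | some x =>
      if category == "Cereals" then pvSelB m category (chosen ++ [x]) rest
      else chosen ++ [x]
    | none => pvSelB m category chosen rest

def get_food_basket_commodities_py_alt (available : List String) : List String :=
  let m := pvIndexB available
  PySem.List.slice
    (pvGroupsB.foldl (fun chosen g => pvSelB m g.1 chosen g.2) []) none (some 6)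

-- ===== PRECONDITION & SPEC =====
def Spec_get_food_basket_commodities_py (available : List String) (out : List String) : Prop := out = get_food_basket_commodities_py_alt available
instance (available : List String) (out : List String) : Decidable (Spec_get_food_basket_commodities_py available out) := by unfold Spec_get_food_basket_commodities_py; infer_instance

-- ===== CLAIM (what is proved, stated in full; the proofs are below) =====
def Claim_equal_get_food_basket_commodities_py : Prop := ∀ (available : List String), Dom_get_food_basket_commodities_py available → Spec_get_food_basket_commodities_py available (get_food_basket_commodities_py available)

-- ===== LEMMAS AND PROOFS =====

-- Stage 1 characterisation, inner loop: one commodity appended to every matching pattern's entry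
theorem pvIndexB_inner (c : String) (q : String) :
    ∀ (pats : List String), pats.Nodup → ∀ (d : PySem.Dict String (List String)),
    (pats.foldl
        (fun d p =>
          if PySem.Str.isIn p (PySem.Str.lower c) then d.modify p [] (· ++ [c]) else d) d).getD q [] =
      if q ∈ pats ∧ PySem.Str.isIn q (PySem.Str.lower c) then d.getD q [] ++ [c]
      else d.getD q [] := by
  intro pats
  induction pats with
  | nil => intro _ d; simp
  | cons p rest ih =>
    intro hnd d
    rcases List.nodup_cons.mp hnd with ⟨hp, hrest⟩
    simp only [List.foldl_cons]
    rw [ih hrest]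
    by_cases hq : q = p
    · subst hq
      simp only [hp, false_and, if_false, List.mem_cons, true_or, true_and]
      by_cases hm : PySem.Chars.isIn q.toList (PySem.Chars.lower c.toList) = true
      · simp [hm, PySem.Dict.getD_modify]
      · simp [hm]
    · by_cases hm : PySem.Chars.isIn p.toList (PySem.Chars.lower c.toList) = true
      · simp [hm, PySem.Dict.getD_modify, hq, List.mem_cons]
      · simp [hm, List.mem_cons, hq]

-- the initial dict comprehension maps every key to []
theorem pvIndexB_init (q : String) :
    (pvPatsB.foldl (fun d p => d.insert p []) (PySem.Dict.empty (κ := String) (ν := List String))).getD q [] = [] := by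
  simp only [pvPatsB, List.foldl_cons, List.foldl_nil, PySem.Dict.getD_insert]
  split_ifs <;> simp

-- Stage 1 characterisation: the index entry of q is available filtered by q-match, in order
theorem pvIndexB_getD (available : List String) (q : String) (hq : q ∈ pvPatsB) :
    (pvIndexB available).getD q [] =
      available.filter (fun c => PySem.Str.isIn q (PySem.Str.lower c)) := by
  unfold pvIndexB
  have hnd : pvPatsB.Nodup := by decide
  suffices h : ∀ d : PySem.Dict String (List String),
      (available.foldl
        (fun d c =>
          pvPatsB.foldl
            (fun d p =>
              if PySem.Str.isIn p (PySem.Str.lower c) then d.modify p [] (· ++ [c]) else d) d) d).getD q [] =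
      d.getD q [] ++ available.filter (fun c => PySem.Str.isIn q (PySem.Str.lower c)) by
    rw [h, pvIndexB_init]; simp
  induction available with
  | nil => intro d; simp
  | cons c rest ih =>
    intro d
    simp only [List.foldl_cons, List.filter_cons]
    rw [ih, pvIndexB_inner c q pvPatsB hnd d]
    simp only [hq, true_and]
    split_ifs with h
    · simp [List.append_assoc]
    · simp

-- A's inner break-loop over `available` equals picking from the filtered index entry
theorem pvInnerA_eq_pick (pattern category : String) (st : List String × PySem.Set String)
    (xs : List String) :
    pvInnerA pattern category st xs =
      match pvPickB st.1 (xs.filter (fun c => PySem.Str.isIn pattern (PySem.Str.lower c))) with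
      | some c => (st.1 ++ [c], PySem.Set.add st.2 category)
      | none => st := by
  induction xs with
  | nil => simp [pvInnerA, pvPickB]
  | cons c rest ih =>
    simp only [pvInnerA, List.filter_cons]
    split_ifs with h1 h2 <;> simp_all [pvPickB]

-- categories added by A's fold come from the processed patterns
theorem pvFoldA_cats (available : List String) (pats : List (String × String)) :
    ∀ (st : List String × PySem.Set String),
      ∀ x ∈ (pats.foldl (pvStepA available) st).2, x ∈ st.2 ∨ x ∈ pats.map Prod.snd := by
  induction pats with
  | nil => intro st x hx; exact Or.inl hx
  | cons pc rest ih =>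
    intro st x hx
    simp only [List.foldl_cons] at hx
    have h := ih (pvStepA available st pc) x hx
    have hstep : ∀ y ∈ (pvStepA available st pc).2, y ∈ st.2 ∨ y = pc.2 := by
      intro y hy
      unfold pvStepA at hy
      split_ifs at hy with hskip
      · exact Or.inl hy
      · rw [pvInnerA_eq_pick] at hy
        cases hfind : pvPickB st.1
            (available.filter (fun c => PySem.Str.isIn pc.1 (PySem.Str.lower c))) with
        | none => rw [hfind] at hy; exact Or.inl hy
        | some c =>
          rw [hfind] at hy
          simpa [PySem.Set.mem_add] using hy
    rcases h with h | h
    · rcases hstep x h with h' | h'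
      · exact Or.inl h'
      · subst h'; right; simp
    · right; simp [h]

-- a run of "Cereals" patterns is never skipped: it is B's Cereals group read off the index
theorem pvFoldA_multi (available : List String) (m : PySem.Dict String (List String))
    (pats : List (String × String)) :
    ∀ (st : List String × PySem.Set String), (∀ p ∈ pats, p.2 = "Cereals") →
      (∀ p ∈ pats, m.getD p.1 [] =
        available.filter (fun c => PySem.Str.isIn p.1 (PySem.Str.lower c))) →
      (pats.foldl (pvStepA available) st).1 =
        pvSelB m "Cereals" st.1 (pats.map Prod.fst) := by
  induction pats with
  | nil => intro st _ _; simp [pvSelB]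
  | cons pc rest ih =>
    intro st hc hm
    have hpc : pc.2 = "Cereals" := hc pc (by simp)
    have hmm : m.getD pc.1 [] =
        available.filter (fun c => PySem.Str.isIn pc.1 (PySem.Str.lower c)) := hm pc (by simp)
    simp only [List.foldl_cons, List.map_cons, pvSelB]
    have hstep : pvStepA available st pc = pvInnerA pc.1 pc.2 st available := by
      unfold pvStepA; rw [hpc]; simp
    rw [hstep, pvInnerA_eq_pick, hmm]
    cases hfind : pvPickB st.1
        (available.filter (fun c => PySem.Str.isIn pc.1 (PySem.Str.lower c))) with
    | none =>
      exact ih st (fun p hp => hc p (by simp [hp])) (fun p hp => hm p (by simp [hp]))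
    | some c =>
      simp only [beq_self_eq_true, if_true]
      rw [hpc]
      exact ih (st.1 ++ [c], PySem.Set.add st.2 "Cereals")
        (fun p hp => hc p (by simp [hp])) (fun p hp => hm p (by simp [hp]))

-- once a non-Cereals category is selected, all its remaining patterns are skipped
theorem pvFoldA_skip (available : List String) (pats : List (String × String)) :
    ∀ (st : List String × PySem.Set String) (cat : String), cat ≠ "Cereals" →
      (∀ p ∈ pats, p.2 = cat) → cat ∈ st.2 →
      pats.foldl (pvStepA available) st = st := by
  induction pats with
  | nil => intro st cat _ _ _; rfl
  | cons pc rest ih =>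
    intro st cat hne hc hm
    have hpc : pc.2 = cat := hc pc (by simp)
    have hstep : pvStepA available st pc = st := by
      unfold pvStepA
      rw [hpc, if_pos]
      simp only [Bool.and_eq_true, Bool.not_eq_true', beq_eq_false_iff_ne]
      exact ⟨(PySem.Set.contains_iff st.2 cat).mpr hm, hne⟩
    simp only [List.foldl_cons, hstep]
    exact ih st cat hne (fun p hp => hc p (by simp [hp])) hm

-- a run of patterns of one fresh non-Cereals category is B's non-Cereals group read off the index
theorem pvFoldA_single (available : List String) (m : PySem.Dict String (List String))
    (pats : List (String × String)) :
    ∀ (st : List String × PySem.Set String) (cat : String), cat ≠ "Cereals" →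
      (∀ p ∈ pats, p.2 = cat) →
      (∀ p ∈ pats, m.getD p.1 [] =
        available.filter (fun c => PySem.Str.isIn p.1 (PySem.Str.lower c))) →
      cat ∉ st.2 →
      (pats.foldl (pvStepA available) st).1 =
        pvSelB m cat st.1 (pats.map Prod.fst) := by
  induction pats with
  | nil => intro st cat _ _ _ _; simp [pvSelB]
  | cons pc rest ih =>
    intro st cat hne hc hmf hm
    have hpc : pc.2 = cat := hc pc (by simp)
    have hmm : m.getD pc.1 [] =
        available.filter (fun c => PySem.Str.isIn pc.1 (PySem.Str.lower c)) := hmf pc (by simp)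
    have hstep : pvStepA available st pc = pvInnerA pc.1 pc.2 st available := by
      unfold pvStepA
      rw [if_neg]
      simp only [Bool.and_eq_true, Bool.not_eq_true', beq_eq_false_iff_ne, not_and]
      intro hcont
      exact absurd ((PySem.Set.contains_iff st.2 pc.2).mp hcont) (hpc ▸ hm)
    simp only [List.foldl_cons, List.map_cons, pvSelB, hstep]
    rw [pvInnerA_eq_pick, hmm]
    cases hfind : pvPickB st.1
        (available.filter (fun c => PySem.Str.isIn pc.1 (PySem.Str.lower c))) with
    | none =>
      exact ih st cat hne (fun p hp => hc p (by simp [hp]))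
        (fun p hp => hmf p (by simp [hp])) hm
    | some c =>
      have hcatne : (cat == "Cereals") = false := by
        simp [hne]
      simp only [hcatne, Bool.false_eq_true, if_false]
      have hmem : cat ∈ (PySem.Set.add st.2 pc.2) := by
        rw [PySem.Set.mem_add]; exact Or.inr hpc.symm
      rw [pvFoldA_skip available rest (st.1 ++ [c], PySem.Set.add st.2 pc.2) cat hne
        (fun p hp => hc p (by simp [hp])) hmem]

-- ===== VERDICT (by name: the statement is the Claim_ definition above) =====
set_option maxHeartbeats 1000000 in
theorem get_food_basket_commodities_py_spec : Claim_equal_get_food_basket_commodities_py := by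
  intro available _
  unfold Spec_get_food_basket_commodities_py get_food_basket_commodities_py
    get_food_basket_commodities_py_alt
  congr 1
  set m := pvIndexB available with hmdef
  have hidx : ∀ q ∈ pvPatsB, m.getD q [] =
      available.filter (fun c => PySem.Str.isIn q (PySem.Str.lower c)) := by
    intro q hq; rw [hmdef]; exact pvIndexB_getD available q hq
  -- split A's pattern list into the five per-category runs
  have hsplit : pvPatternsA =
      [("sorghum", "Cereals"), ("maize", "Cereals"), ("wheat", "Cereals"), ("rice", "Cereals")] ++
      [("beans", "Pulses"), ("lentil", "Pulses")] ++ [("oil", "Oil")] ++ [("salt", "Condiments")] ++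
      [("sugar", "Sugar")] := rfl
  rw [hsplit]
  simp only [List.foldl_append]
  set st0 : List String × PySem.Set String := ([], PySem.Set.empty) with hst0
  set st1 := List.foldl (pvStepA available) st0
    [("sorghum", "Cereals"), ("maize", "Cereals"), ("wheat", "Cereals"), ("rice", "Cereals")]
    with hst1
  set st2 := List.foldl (pvStepA available) st1 [("beans", "Pulses"), ("lentil", "Pulses")]
    with hst2
  set st3 := List.foldl (pvStepA available) st2 [("oil", "Oil")] with hst3
  set st4 := List.foldl (pvStepA available) st3 [("salt", "Condiments")] with hst4
  -- category-membership bounds across the runs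
  have hc1 : ∀ x ∈ st1.2, x = "Cereals" := by
    intro x hx
    rcases pvFoldA_cats available _ st0 x hx with h | h
    · simp [hst0, PySem.Set.empty] at h
    · simpa using h
  have hc2 : ∀ x ∈ st2.2, x = "Cereals" ∨ x = "Pulses" := by
    intro x hx
    rcases pvFoldA_cats available _ st1 x hx with h | h
    · exact Or.inl (hc1 x h)
    · right; simpa using h
  have hc3 : ∀ x ∈ st3.2, x = "Cereals" ∨ x = "Pulses" ∨ x = "Oil" := by
    intro x hx
    rcases pvFoldA_cats available _ st2 x hx with h | h
    · rcases hc2 x h with h' | h'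
      · exact Or.inl h'
      · exact Or.inr (Or.inl h')
    · right; right; simpa using h
  have hc4 : ∀ x ∈ st4.2, x = "Cereals" ∨ x = "Pulses" ∨ x = "Oil" ∨ x = "Condiments" := by
    intro x hx
    rcases pvFoldA_cats available _ st3 x hx with h | h
    · rcases hc3 x h with h' | h' | h'
      · exact Or.inl h'
      · exact Or.inr (Or.inl h')
      · exact Or.inr (Or.inr (Or.inl h'))
    · right; right; right; simpa using h
  -- the five runs, one by one
  have h1 : st1.1 = pvSelB m "Cereals" [] ["sorghum", "maize", "wheat", "rice"] := by
    rw [hst1, pvFoldA_multi available m _ st0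
      (by intro p hp; simp at hp; rcases hp with rfl | rfl | rfl | rfl <;> rfl)
      (by intro p hp; simp at hp; rcases hp with rfl | rfl | rfl | rfl <;>
        exact hidx _ (by decide))]
    rfl
  have h2 : st2.1 = pvSelB m "Pulses" st1.1 ["beans", "lentil"] := by
    rw [hst2, pvFoldA_single available m _ st1 "Pulses" (by decide)
      (by intro p hp; simp at hp; rcases hp with rfl | rfl <;> rfl)
      (by intro p hp; simp at hp; rcases hp with rfl | rfl <;> exact hidx _ (by decide))
      (fun hm => by have := hc1 _ hm; simp at this)]
    rfl
  have h3 : st3.1 = pvSelB m "Oil" st2.1 ["oil"] := by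
    rw [hst3, pvFoldA_single available m _ st2 "Oil" (by decide)
      (by intro p hp; simp at hp; subst hp; rfl)
      (by intro p hp; simp at hp; subst hp; exact hidx _ (by decide))
      (fun hm => by rcases hc2 _ hm with h | h <;> simp at h)]
    rfl
  have h4 : st4.1 = pvSelB m "Condiments" st3.1 ["salt"] := by
    rw [hst4, pvFoldA_single available m _ st3 "Condiments" (by decide)
      (by intro p hp; simp at hp; subst hp; rfl)
      (by intro p hp; simp at hp; subst hp; exact hidx _ (by decide))
      (fun hm => by rcases hc3 _ hm with h | h | h <;> simp at h)]
    rfl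
  have h5 : (List.foldl (pvStepA available) st4 [(("sugar" : String), ("Sugar" : String))]).1 =
      pvSelB m "Sugar" st4.1 ["sugar"] := by
    rw [pvFoldA_single available m _ st4 "Sugar" (by decide)
      (by intro p hp; simp at hp; subst hp; rfl)
      (by intro p hp; simp at hp; subst hp; exact hidx _ (by decide))
      (fun hm => by rcases hc4 _ hm with h | h | h | h <;> simp at h)]
    rfl
  show (List.foldl (pvStepA available) st4 [(("sugar" : String), ("Sugar" : String))]).1 =
      pvSelB m "Sugar"
        (pvSelB m "Condiments"
          (pvSelB m "Oil"
            (pvSelB m "Pulses"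
              (pvSelB m "Cereals" [] ["sorghum", "maize", "wheat", "rice"])
              ["beans", "lentil"]) ["oil"]) ["salt"]) ["sugar"]
  rw [h5, h4, h3, h2, h1]
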